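-- pv_equiv track=rewrite | github.com/jameshyojaelee/MASLD-RNA-seq-Explorer | app.py | build_combo_counts
-- ===== SOURCE A (Python) =====
-- def build_combo_counts(
--     sets: dict[str, set[str]],
--     labels: list[str],
-- ) -> tuple[dict[tuple[str, ...], int], dict[str, set[str]], set[str]]:
--     selected = {label: sets[label] for label in labels if label in sets}
--     if not selected:
--         return {}, selected, set()
--     union = set.union(*selected.values())
--     combo_counts: dict[tuple[str, ...], int] = {}
--     ordered_labels = [label for label in labels if label in selected]
--     for gene in union:
--         combo = tuple(label for label in ordered_labels if gene in selected[label])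
--         combo_counts[combo] = combo_counts.get(combo, 0) + 1
--     return combo_counts, selected, union
-- ===== SOURCE B (Python) =====
-- def build_combo_counts(sets, labels):
--     ordered_labels = [label for label in labels if label in sets]
--     selected = {}
--     for label in ordered_labels:
--         if label not in selected:
--             selected[label] = sets[label]
--     if not ordered_labels:
--         return {}, selected, set()
--     gene_combo = {}
--     for label in ordered_labels:
--         for gene in sets[label]:
--             gene_combo.setdefault(gene, []).append(label)
--     combo_counts = {}
--     for combo_list in gene_combo.values():
--         combo = tuple(combo_list)
--         combo_counts[combo] = combo_counts.get(combo, 0) + 1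
--     return combo_counts, selected, set(gene_combo)
-- ===== Notes on version B (the rewrite author's own statement) =====
-- stated objective: faster
-- what changed: Instead of scanning every selected label's set for every gene of the union, B inverts the loops: one pass over each selected set appends the label to a per-gene combo list (dict.setdefault), then a single pass tallies those precomputed combos; the per-gene inner membership scan over all labels disappears.
import Mathlib
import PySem

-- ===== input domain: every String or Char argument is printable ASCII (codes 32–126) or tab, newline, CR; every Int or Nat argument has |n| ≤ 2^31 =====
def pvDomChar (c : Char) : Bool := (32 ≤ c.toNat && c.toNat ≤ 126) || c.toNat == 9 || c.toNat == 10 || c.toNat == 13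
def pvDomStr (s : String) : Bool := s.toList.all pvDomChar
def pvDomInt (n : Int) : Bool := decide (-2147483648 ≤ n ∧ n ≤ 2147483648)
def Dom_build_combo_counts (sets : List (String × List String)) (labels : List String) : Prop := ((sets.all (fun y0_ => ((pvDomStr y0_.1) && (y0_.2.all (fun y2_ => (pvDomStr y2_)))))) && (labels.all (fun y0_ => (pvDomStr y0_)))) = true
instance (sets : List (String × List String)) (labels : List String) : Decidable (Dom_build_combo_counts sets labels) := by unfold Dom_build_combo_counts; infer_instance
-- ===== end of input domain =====

-- B inverts A's per-gene scan over all selected labels: one pass over each selected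
-- set appends the label to a per-gene combo list, then a single pass tallies those
-- combos (objective: faster). Dict/set outputs are modelled per the type convention
-- (insertion-ordered assoc lists / distinct-element lists) via PySem.Dict / PySem.Set.

-- ===== PORT A =====
def build_combo_counts (sets : List (String × List String)) (labels : List String) : (List (List String × Int)) × (List (String × List String)) × List String :=
  let d := PySem.Dict.mk sets
  let selected : PySem.Dict String (List String) :=
    labels.foldl (fun acc label =>
      match d.get? label with
      | some v => acc.insert label v
      | none => acc) PySem.Dict.empty
  if selected.items.isEmpty then ([], selected.items, [])
  else
    -- set.union(*selected.values()): fold Python set-union over the value sets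
    let union : PySem.Set String :=
      selected.values.foldl (fun u v => PySem.Set.union u v) PySem.Set.empty
    let ordered_labels := labels.filter (fun label => selected.contains label)
    let combo_counts : PySem.Dict (List String) Int :=
      union.foldl (fun cc gene =>
        let combo := ordered_labels.filter (fun label => (selected.getD label []).contains gene)
        cc.insert combo (cc.getD combo 0 + 1)) PySem.Dict.empty
    (combo_counts.items, selected.items, union)

-- ===== PORT B =====
def build_combo_counts_alt (sets : List (String × List String)) (labels : List String) : (List (List String × Int)) × (List (String × List String)) × List String :=
  let d := PySem.Dict.mk sets
  let ordered_labels := labels.filter (fun label => d.contains label)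
  -- selected: plain first-occurrence assoc list ('if label not in selected: selected[label] = sets[label]')
  let selected_items : List (String × List String) :=
    ordered_labels.foldl (fun acc label =>
      if (acc.map Prod.fst).contains label then acc
      else acc ++ [(label, d.getD label [])]) []
  if ordered_labels.isEmpty then ([], selected_items, [])
  else
    -- for label in ordered_labels: for gene in sets[label] (a Python set: its distinct
    -- elements): gene_combo.setdefault(gene, []).append(label)
    let gene_combo : PySem.Dict String (List String) :=
      ordered_labels.foldl (fun gc label =>
        (PySem.Set.ofList (d.getD label [])).foldl (fun gc gene =>
          gc.insert gene (gc.getD gene [] ++ [label])) gc) PySem.Dict.empty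
    let combo_counts : PySem.Dict (List String) Int :=
      gene_combo.values.foldl (fun cc combo =>
        cc.insert combo (cc.getD combo 0 + 1)) PySem.Dict.empty
    (combo_counts.items, selected_items, gene_combo.keys)

-- ===== PRECONDITION & SPEC =====
def Spec_build_combo_counts (sets : List (String × List String)) (labels : List String) (out : (List (List String × Int)) × (List (String × List String)) × List String) : Prop := out = build_combo_counts_alt sets labels
instance (sets : List (String × List String)) (labels : List String) (out : (List (List String × Int)) × (List (String × List String)) × List String) : Decidable (Spec_build_combo_counts sets labels out) := by unfold Spec_build_combo_counts; infer_instance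

-- ===== CLAIM (what is proved, stated in full; the proofs are below) =====
def Claim_equal_build_combo_counts : Prop := ∀ (sets : List (String × List String)) (labels : List String), Dom_build_combo_counts sets labels → Spec_build_combo_counts sets labels (build_combo_counts sets labels)

-- ===== LEMMAS AND PROOFS =====

lemma pvValues_eq_map_getD (d : PySem.Dict String (List String)) (h : d.keys.Nodup) :
    d.values = d.keys.map (fun k => d.getD k []) := by
  simp only [PySem.Dict.values, PySem.Dict.keys, List.map_map]
  apply List.map_congr_left
  intro p hp
  exact (PySem.Dict.getD_of_mem_items d (by simpa using hp) h []).symm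

lemma pvMem_U (f : String → List String) (ord : List String) (g : String) :
    g ∈ ord.foldl (fun u l => PySem.Set.update u (f l)) ([] : PySem.Set String)
      ↔ ∃ l ∈ ord, g ∈ f l := by
  induction ord using List.reverseRecOn with
  | nil => simp
  | append_singleton xs x ih =>
    simp only [List.foldl_append, List.foldl_cons, List.foldl_nil, PySem.Set.mem_update, ih,
      List.mem_append, List.mem_singleton]
    constructor
    · rintro (⟨l, hl, hg⟩ | hg)
      · exact ⟨l, Or.inl hl, hg⟩
      · exact ⟨x, Or.inr rfl, hg⟩
    · rintro ⟨l, hl | rfl, hg⟩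
      · exact Or.inl ⟨l, hl, hg⟩
      · exact Or.inr hg

lemma pvNodup_U (f : String → List String) (ord : List String) :
    (ord.foldl (fun u l => PySem.Set.update u (f l)) ([] : PySem.Set String)).Nodup := by
  induction ord using List.reverseRecOn with
  | nil => simp
  | append_singleton xs x ih =>
    simpa [List.foldl_append] using PySem.Set.nodup_update _ _ ih

lemma pvUpdate_of_subset (s : PySem.Set String) (xs : List String) (h : ∀ x ∈ xs, x ∈ s) :
    s.update xs = s := by
  rw [PySem.Set.update_eq_append_filter]
  have : List.filter (fun y => !s.contains y) (PySem.Set.ofList xs) = [] := by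
    rw [List.filter_eq_nil_iff]
    intro y hy
    have : y ∈ s := h y (by simpa [PySem.Set.mem_ofList] using hy)
    simp [this]
  rw [this, List.append_nil]

lemma pvDedup_U (f : String → List String) (ord : List String) :
    (PySem.Set.ofList ord).foldl (fun u l => PySem.Set.update u (f l)) ([] : PySem.Set String)
      = ord.foldl (fun u l => PySem.Set.update u (f l)) ([] : PySem.Set String) := by
  induction ord using List.reverseRecOn with
  | nil => simp
  | append_singleton xs x ih =>
    rw [PySem.Set.ofList_append_singleton, PySem.Set.add_eq_ite, List.foldl_append]
    by_cases hx : x ∈ PySem.Set.ofList xs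
    · rw [if_pos hx, ih]
      refine (pvUpdate_of_subset _ _ ?_).symm
      intro y hy
      rw [pvMem_U]
      exact ⟨x, by simpa [PySem.Set.mem_ofList] using hx, hy⟩
    · rw [if_neg hx, List.foldl_append, ih]

def pvSelStep (d : PySem.Dict String (List String)) (acc : PySem.Dict String (List String)) (label : String) : PySem.Dict String (List String) :=
  match d.get? label with
  | some v => acc.insert label v
  | none => acc

lemma pvSel_items (d : PySem.Dict String (List String)) (labels : List String) :
    (labels.foldl (pvSelStep d) PySem.Dict.empty).items
      = (PySem.Set.ofList (labels.filter (fun l => (d.get? l).isSome))).map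
          (fun l => (l, (d.get? l).getD [])) := by
  induction labels using List.reverseRecOn with
  | nil => simp [PySem.Dict.empty]
  | append_singleton xs x ih =>
    rw [List.foldl_append, List.foldl_cons, List.foldl_nil, List.filter_append]
    cases hg : d.get? x with
    | none =>
      simp only [pvSelStep, hg]
      simpa [hg] using ih
    | some v =>
      simp only [pvSelStep, hg]
      rw [show List.filter (fun l => (d.get? l).isSome) [x] = [x] by simp [hg]]
      rw [PySem.Set.ofList_append_singleton, PySem.Set.add_eq_ite]
      have hkeys : (xs.foldl (pvSelStep d) PySem.Dict.empty).keys
          = PySem.Set.ofList (xs.filter (fun l => (d.get? l).isSome)) := by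
        simp only [PySem.Dict.keys, ih, List.map_map]
        exact List.map_id'' (fun y => rfl) _
      by_cases hx : x ∈ PySem.Set.ofList (xs.filter (fun l => (d.get? l).isSome))
      · rw [if_pos hx]
        have hc : (xs.foldl (pvSelStep d) PySem.Dict.empty).contains x = true := by
          rw [PySem.Dict.contains_eq_decide_mem_keys, hkeys]; simpa using hx
        rw [PySem.Dict.items_insert_of_contains _ v hc, ih, List.map_map]
        apply List.map_congr_left
        intro l hl
        by_cases hlx : l = x
        · subst hlx; simp [hg]
        · simp [Function.comp, hlx]
      · rw [if_neg hx]
        have hc : (xs.foldl (pvSelStep d) PySem.Dict.empty).contains x = false := by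
          rw [PySem.Dict.contains_eq_decide_mem_keys, hkeys]; simpa using hx
        rw [PySem.Dict.items_insert_of_not_contains _ v hc, ih, List.map_append]
        simp [hg]

lemma pvSelB (d : PySem.Dict String (List String)) (L : List String) :
    L.foldl (fun acc label =>
        if (acc.map Prod.fst).contains label then acc
        else acc ++ [(label, d.getD label [])]) ([] : List (String × List String))
      = (PySem.Set.ofList L).map (fun l => (l, d.getD l [])) := by
  induction L using List.reverseRecOn with
  | nil => simp
  | append_singleton xs x ih =>
    rw [List.foldl_append, List.foldl_cons, List.foldl_nil, ih,
        PySem.Set.ofList_append_singleton, PySem.Set.add_eq_ite]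
    have hm : ((PySem.Set.ofList xs).map (fun l => (l, d.getD l []))).map Prod.fst
        = PySem.Set.ofList xs := by
      rw [List.map_map]; exact List.map_id'' (fun y => rfl) _
    by_cases hx : x ∈ PySem.Set.ofList xs
    · simp [hm, hx]
    · simp [hm, hx]

lemma pvMapOfListEmpty (f : String → String × List String) (L : List String) :
    ((PySem.Set.ofList L).map f).isEmpty = L.isEmpty := by
  cases L with
  | nil => simp
  | cons x xs => simp [PySem.Set.ofList_cons]

lemma pvInner (lab : String) :
    ∀ (s : List String), s.Nodup →
    ∀ (d : PySem.Dict String (List String)), d.keys.Nodup →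
    (s.foldl (fun gc g => gc.insert g (gc.getD g [] ++ [lab])) d).items
      = d.items.map (fun p => (p.1, if s.contains p.1 then p.2 ++ [lab] else p.2))
        ++ (s.filter (fun g => !(d.contains g))).map (fun g => (g, [lab]))
  | [], _, d, hd => by
      simp
  | g0 :: s', hs, d, hd => by
      have hg0 : g0 ∉ s' := (List.nodup_cons.mp hs).1
      have hs' : s'.Nodup := (List.nodup_cons.mp hs).2
      rw [List.foldl_cons]
      have hd1n : (d.insert g0 (d.getD g0 [] ++ [lab])).keys.Nodup :=
        PySem.Dict.nodup_keys_insert d _ _ hd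
      rw [pvInner lab s' hs' _ hd1n]
      have hcontains1 : ∀ g ∈ s',
          ((d.insert g0 (d.getD g0 [] ++ [lab])).contains g) = d.contains g := by
        intro g hgm
        rw [PySem.Dict.contains_insert]
        have : g ≠ g0 := fun h => hg0 (h ▸ hgm)
        simp [this]
      have hfilter : (s'.filter (fun g => !((d.insert g0 (d.getD g0 [] ++ [lab])).contains g)))
          = s'.filter (fun g => !(d.contains g)) := by
        apply List.filter_congr
        intro g hgm
        rw [hcontains1 g hgm]
      rw [hfilter]
      by_cases hc : d.contains g0 = true
      · rw [PySem.Dict.items_insert_of_contains d _ hc, List.map_map]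
        have hfc : List.filter (fun g => !(d.contains g)) (g0 :: s')
            = s'.filter (fun g => !(d.contains g)) := by
          simp [hc]
        rw [hfc]
        congr 1
        apply List.map_congr_left
        intro p hp
        by_cases hpe : p.1 = g0
        · have hval : d.getD g0 [] = p.2 := by
            have hmem : (g0, p.2) ∈ d.items := by rw [← hpe]; simpa using hp
            exact PySem.Dict.getD_of_mem_items d hmem hd []
          have hns : s'.contains g0 = false := by simpa using hg0
          simp [Function.comp, hpe, hval, hg0]
        · have hbe : (p.1 == g0) = false := by simpa using hpe
          simp [Function.comp, hbe, hpe]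
      · have hcf : d.contains g0 = false := by simpa using hc
        rw [PySem.Dict.items_insert_of_not_contains d _ hcf,
            PySem.Dict.getD_of_not_contains d [] hcf]
        have hfc : List.filter (fun g => !(d.contains g)) (g0 :: s')
            = g0 :: s'.filter (fun g => !(d.contains g)) := by
          simp [hcf]
        rw [hfc, List.map_append, List.map_cons]
        have hns : s'.contains g0 = false := by simpa using hg0
        have hmap : d.items.map (fun p => (p.1, if s'.contains p.1 then p.2 ++ [lab] else p.2))
            = d.items.map (fun p => (p.1, if (g0 :: s').contains p.1 then p.2 ++ [lab] else p.2)) := by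
          apply List.map_congr_left
          intro p hp
          have hpk : p.1 ∈ d.keys := by
            simp only [PySem.Dict.keys]; exact List.mem_map_of_mem hp
          have hpe : p.1 ≠ g0 := by
            intro h
            rw [PySem.Dict.contains_eq_decide_mem_keys] at hcf
            simp [← h, hpk] at hcf
          simp [hpe]
        simp only [List.map_nil, List.nil_append, hns, Bool.false_eq_true, hmap]
        simp [List.append_assoc]

lemma pvGC (f : String → List String) (ord : List String) :
    (ord.foldl (fun gc l =>
        (PySem.Set.ofList (f l)).foldl (fun gc g => gc.insert g (gc.getD g [] ++ [l])) gc)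
      PySem.Dict.empty).items
      = (ord.foldl (fun u l => PySem.Set.update u (f l)) ([] : PySem.Set String)).map
          (fun g => (g, ord.filter (fun l => (f l).contains g))) := by
  induction ord using List.reverseRecOn with
  | nil => simp [PySem.Dict.empty]
  | append_singleton xs x ih =>
    rw [List.foldl_append, List.foldl_cons, List.foldl_nil,
        List.foldl_append, List.foldl_cons, List.foldl_nil]
    have hkeys : (xs.foldl (fun gc l =>
          (PySem.Set.ofList (f l)).foldl (fun gc g => gc.insert g (gc.getD g [] ++ [l])) gc)
        PySem.Dict.empty).keys
        = xs.foldl (fun u l => PySem.Set.update u (f l)) ([] : PySem.Set String) := by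
      simp only [PySem.Dict.keys, ih, List.map_map]
      exact List.map_id'' (fun y => rfl) _
    have hdn : (xs.foldl (fun gc l =>
          (PySem.Set.ofList (f l)).foldl (fun gc g => gc.insert g (gc.getD g [] ++ [l])) gc)
        PySem.Dict.empty).keys.Nodup := by
      rw [hkeys]; exact pvNodup_U f xs
    rw [pvInner x (PySem.Set.ofList (f x)) (PySem.Set.nodup_ofList _) _ hdn, ih, List.map_map,
        PySem.Set.update_eq_append_filter, List.map_append]
    congr 1
    · apply List.map_congr_left
      intro g hg
      simp only [Function.comp, List.filter_append]
      by_cases hm : g ∈ f x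
      · simp [hm]
      · simp [hm]
    · have hfeq : List.filter (fun g => !((xs.foldl (fun gc l =>
            (PySem.Set.ofList (f l)).foldl (fun gc g => gc.insert g (gc.getD g [] ++ [l])) gc)
          PySem.Dict.empty).contains g)) (PySem.Set.ofList (f x))
          = List.filter (fun y => !((xs.foldl (fun u l => PySem.Set.update u (f l))
              ([] : PySem.Set String)).contains y)) (PySem.Set.ofList (f x)) := by
        apply List.filter_congr
        intro g _
        rw [PySem.Dict.contains_eq_decide_mem_keys, hkeys]
        by_cases hm : g ∈ xs.foldl (fun u l => PySem.Set.update u (f l)) ([] : PySem.Set String)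
        · simp [hm]
        · simp [hm]
      rw [hfeq]
      apply List.map_congr_left
      intro g hg
      have hnm : g ∉ xs.foldl (fun u l => PySem.Set.update u (f l)) ([] : PySem.Set String) := by
        have := (List.mem_filter.mp hg).2
        intro hmem
        simp [hmem] at this
      have hnil : xs.filter (fun l => (f l).contains g) = [] := by
        rw [List.filter_eq_nil_iff]
        intro l hl hcon
        exact hnm ((pvMem_U f xs g).mpr ⟨l, hl, by simpa using hcon⟩)
      have hmemx : g ∈ f x := by
        have := (List.mem_filter.mp hg).1
        simpa [PySem.Set.mem_ofList] using this
      simp [List.filter_append, hmemx]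
      intro l hl hcon
      exact hnm ((pvMem_U f xs g).mpr ⟨l, hl, hcon⟩)

-- ===== VERDICT (by name: the statement is the Claim_ definition above) =====
theorem build_combo_counts_spec : Claim_equal_build_combo_counts := by
  intro sets labels _
  unfold Spec_build_combo_counts build_combo_counts build_combo_counts_alt
  dsimp only
  rw [show (fun (acc : PySem.Dict String (List String)) (label : String) =>
        match (PySem.Dict.mk sets).get? label with
        | some v => acc.insert label v
        | none => acc) = pvSelStep (PySem.Dict.mk sets) from rfl]
  set D := PySem.Dict.mk sets with hD
  set sel := labels.foldl (pvSelStep D) PySem.Dict.empty with hsel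
  have hitems := pvSel_items D labels
  have hkeys : sel.keys = PySem.Set.ofList (labels.filter (fun l => (D.get? l).isSome)) := by
    rw [hsel]
    simp only [PySem.Dict.keys, hitems, List.map_map]
    exact List.map_id'' (fun y => rfl) _
  have hkn : sel.keys.Nodup := by rw [hkeys]; exact PySem.Set.nodup_ofList _
  -- B's filter equals the isSome filter
  have hordB : labels.filter (fun l => D.contains l)
      = labels.filter (fun l => (D.get? l).isSome) := by
    apply List.filter_congr
    intro l _
    rw [PySem.Dict.contains_eq_isSome_get?]
  -- A's filter equals the isSome filter
  have hord : labels.filter (fun l => sel.contains l)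
      = labels.filter (fun l => (D.get? l).isSome) := by
    apply List.filter_congr
    intro l hl
    rw [PySem.Dict.contains_eq_decide_mem_keys, hkeys]
    by_cases h : (D.get? l).isSome
    · simp [PySem.Set.mem_ofList, List.mem_filter, hl, h]
    · simp [PySem.Set.mem_ofList, List.mem_filter, h]
  set ordF := labels.filter (fun l => (D.get? l).isSome) with hordF
  -- B's selected assoc list equals A's sel.items
  have hselitems : sel.items
      = (labels.filter (fun l => D.contains l)).foldl (fun acc label =>
          if (acc.map Prod.fst).contains label then acc
          else acc ++ [(label, D.getD label [])]) [] := by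
    rw [hordB, pvSelB, hitems]
    apply List.map_congr_left
    intro l _
    rw [PySem.Dict.getD_eq_get?_getD]
  -- D.getD and sel.getD agree on ordF
  have hf : ∀ l ∈ ordF, D.getD l [] = sel.getD l [] := by
    intro l hl
    have hsome : (D.get? l).isSome := by
      have := (List.mem_filter.mp (hordF ▸ hl)).2
      simpa using this
    have hmem : (l, (D.get? l).getD []) ∈ sel.items := by
      rw [hitems]
      exact List.mem_map_of_mem (by
        rw [PySem.Set.mem_ofList]; exact hordF ▸ hl)
    rw [PySem.Dict.getD_of_mem_items sel hmem hkn, PySem.Dict.getD_eq_get?_getD]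
  by_cases hE : sel.items.isEmpty
  · have hEB : (labels.filter (fun l => D.contains l)).isEmpty = true := by
      rw [hordB, ← pvMapOfListEmpty (fun l => (l, (D.get? l).getD [])) ordF, ← hitems]
      exact hE
    simp only [hE, hEB, if_true]
    rw [hselitems]
  · have hEB : (labels.filter (fun l => D.contains l)).isEmpty = false := by
      have := pvMapOfListEmpty (fun l => (l, (D.get? l).getD [])) ordF
      rw [← hitems] at this
      rw [hordB, ← this]
      simpa using hE
    simp only [hE, hEB, if_false, Bool.false_eq_true]
    rw [hselitems, hordB, hord]
    set f : String → List String := fun l => sel.getD l [] with hfd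
    -- B's gene_combo fold over ordF uses D.getD; swap to sel.getD
    have hswap : ordF.foldl (fun gc label =>
          (PySem.Set.ofList (D.getD label [])).foldl (fun gc gene =>
            gc.insert gene (gc.getD gene [] ++ [label])) gc) PySem.Dict.empty
        = ordF.foldl (fun gc l =>
          (PySem.Set.ofList (f l)).foldl (fun gc g => gc.insert g (gc.getD g [] ++ [l])) gc)
          PySem.Dict.empty := by
      apply PySem.List.foldl_congr_mem
      intro acc x hx
      rw [hf x hx]
    rw [hswap]
    set U := ordF.foldl (fun u l => PySem.Set.update u (f l)) ([] : PySem.Set String) with hU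
    have hunion : sel.values.foldl (fun u v => PySem.Set.union u v) PySem.Set.empty = U := by
      rw [pvValues_eq_map_getD sel hkn, List.foldl_map]
      have hko : sel.keys = PySem.Set.ofList ordF := hkeys
      rw [hko, hU]
      exact pvDedup_U f ordF
    have hgc := pvGC f ordF
    have hgckeys : (ordF.foldl (fun gc l =>
          (PySem.Set.ofList (f l)).foldl (fun gc g => gc.insert g (gc.getD g [] ++ [l])) gc)
        PySem.Dict.empty).keys = U := by
      simp only [PySem.Dict.keys, hgc, List.map_map]
      exact List.map_id'' (fun y => rfl) _
    have hgcvals : (ordF.foldl (fun gc l =>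
          (PySem.Set.ofList (f l)).foldl (fun gc g => gc.insert g (gc.getD g [] ++ [l])) gc)
        PySem.Dict.empty).values
        = U.map (fun g => ordF.filter (fun l => (f l).contains g)) := by
      simp only [PySem.Dict.values, hgc, List.map_map]
      rfl
    rw [hunion, hgckeys, hgcvals, List.foldl_map]
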